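-- pv_equiv track=rewrite | github.com/iebpr89/EDU | COS PRO 2급 Python_성안당/COS PRO 2급 Python_성안당/5회차/풀이/solution-05-02_3개 사면 추가 하나는 50_ 할인 행사의 금액을 계산하는 함수 빈칸 채우기.py | solution
-- ===== SOURCE A (Python) =====
-- def solution(arr):
--     answer = 0
--     for i in range(len(arr)):
--         price = arr[i]
--         if (i+1) % 4 == 0:
--             price //= 2
--         answer += price
--     return answer
-- ===== SOURCE B (Python) =====
-- def solution(arr):
--     total = 0
--     i = 0
--     n = len(arr)
--     while i + 4 <= n:
--         total += arr[i] + arr[i + 1] + arr[i + 2] + arr[i + 3] // 2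
--         i += 4
--     return total + sum(arr[i:])
-- ===== Notes on version B (the rewrite author's own statement) =====
-- stated objective: alternative
-- what changed: Replaces A's per-element indexed loop with a modulo-4 branch by a loop over chunks of four (three full prices plus one half price per chunk) followed by a plain sum of the leftover tail slice.
import Mathlib
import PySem

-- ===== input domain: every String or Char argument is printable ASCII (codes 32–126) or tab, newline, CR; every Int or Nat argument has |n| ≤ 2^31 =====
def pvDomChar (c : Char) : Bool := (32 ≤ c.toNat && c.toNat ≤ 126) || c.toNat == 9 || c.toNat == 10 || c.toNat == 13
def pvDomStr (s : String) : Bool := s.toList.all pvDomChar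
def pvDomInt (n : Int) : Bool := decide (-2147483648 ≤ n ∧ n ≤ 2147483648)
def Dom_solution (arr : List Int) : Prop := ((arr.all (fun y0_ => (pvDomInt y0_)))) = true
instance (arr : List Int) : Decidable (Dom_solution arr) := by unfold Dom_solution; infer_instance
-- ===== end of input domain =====

-- B replaces A's per-index modulo branch by an iterative chunk-of-4 loop plus a tail sum (objective: alternative decomposition, same O(n) cost).

-- ===== PORT A =====
-- for i in range(len(arr)): price = arr[i]; if (i+1)%4==0: price //= 2; answer += price
def solution (arr : List Int) : Int :=
  List.foldl
    (fun answer i =>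
      let price := PySem.List.pyGetD arr i 0
      let price := if PySem.Int.mod (i + 1) 4 = 0 then PySem.Int.floordiv price 2 else price
      answer + price)
    0 (PySem.List.pyRange 0 (arr.length : Int))

-- ===== PORT B =====
-- while i + 4 <= n: total += arr[i]+arr[i+1]+arr[i+2]+arr[i+3]//2; i += 4; then total + sum(arr[i:])
def altLoop (arr : List Int) (n i total : Int) : Int :=
  if _h : i + 4 ≤ n then
    altLoop arr n (i + 4)
      (total + PySem.List.pyGetD arr i 0 + PySem.List.pyGetD arr (i + 1) 0
        + PySem.List.pyGetD arr (i + 2) 0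
        + PySem.Int.floordiv (PySem.List.pyGetD arr (i + 3) 0) 2)
  else total + (PySem.List.slice arr (some i) none).sum
termination_by (n - i).toNat
decreasing_by omega

def solution_alt (arr : List Int) : Int :=
  altLoop arr (arr.length : Int) 0 0

-- ===== PRECONDITION & SPEC =====
def Spec_solution (arr : List Int) (out : Int) : Prop := out = solution_alt arr
instance (arr : List Int) (out : Int) : Decidable (Spec_solution arr out) := by unfold Spec_solution; infer_instance

-- ===== CLAIM (what is proved, stated in full; the proofs are below) =====
def Claim_equal_solution : Prop := ∀ (arr : List Int), Dom_solution arr → Spec_solution arr (solution arr)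

-- ===== LEMMAS AND PROOFS =====

-- phase-indexed reference function: item at running index k, halved when (k+1) % 4 = 0
def phaseSum (k : Nat) : List Int → Int
  | [] => 0
  | x :: xs => (if (k + 1) % 4 = 0 then PySem.Int.floordiv x 2 else x) + phaseSum (k + 1) xs

theorem phaseSum_small (k : Nat) (l : List Int) (hk : k % 4 = 0) (hl : l.length ≤ 3) :
    phaseSum k l = l.sum := by
  have h1 : (k + 1) % 4 ≠ 0 := by omega
  have h2 : (k + 1 + 1) % 4 ≠ 0 := by omega
  have h3 : (k + 1 + 1 + 1) % 4 ≠ 0 := by omega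
  match l with
  | [] => simp [phaseSum]
  | [a] => simp [phaseSum, h1]
  | [a, b] => simp [phaseSum, h1, h2]
  | [a, b, c] => simp [phaseSum, h1, h2, h3]
  | a :: b :: c :: d :: t => simp at hl; omega

theorem phaseSum_chunk (k : Nat) (a b c d : Int) (l : List Int) (hk : k % 4 = 0) :
    phaseSum k (a :: b :: c :: d :: l) =
      a + b + c + PySem.Int.floordiv d 2 + phaseSum (k + 4) l := by
  have h1 : (k + 1) % 4 ≠ 0 := by omega
  have h2 : (k + 2) % 4 ≠ 0 := by omega
  have h3 : (k + 3) % 4 ≠ 0 := by omega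
  have h4 : (k + 4) % 4 = 0 := by omega
  simp [phaseSum, h1, h2, h3, h4]
  ring

-- A's fold from index i computes phaseSum i (arr.drop i)
theorem foldA_eq (arr : List Int) (i : Nat) (acc : Int) (hi : i ≤ arr.length) :
    List.foldl
      (fun answer j =>
        let price := PySem.List.pyGetD arr j 0
        let price := if PySem.Int.mod (j + 1) 4 = 0 then PySem.Int.floordiv price 2 else price
        answer + price)
      acc (PySem.List.pyRange (i : Int) (arr.length : Int)) =
      acc + phaseSum i (arr.drop i) := by
  by_cases h : i < arr.length
  · rw [PySem.List.pyRange_one_cons (by exact_mod_cast h)]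
    have : ((i : Int) + 1) = ((i + 1 : Nat) : Int) := by push_cast; ring
    simp only [List.foldl_cons, this]
    rw [foldA_eq arr (i + 1) _ (by omega)]
    have hd : arr.drop i = arr[i] :: arr.drop (i + 1) := by
      exact (List.drop_eq_getElem_cons h)
    rw [hd]
    have hg : PySem.List.pyGetD arr (i : Int) 0 = arr[i] := by
      rw [PySem.List.pyGetD_eq_getElem arr 0 (by positivity) (by exact_mod_cast h)]
      simp
    have hm : PySem.Int.mod ((i : Nat) + 1 : Int) 4 = (((i + 1) % 4 : Nat) : Int) := by
      exact_mod_cast PySem.Int.mod_natCast (i + 1) 4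
    simp only [phaseSum, hg]
    have : ((((i + 1) % 4 : Nat) : Int) = 0) ↔ ((i + 1) % 4 = 0) := by omega
    split_ifs with hc hc' hc' <;> simp_all <;> try ring
  · have hi' : i = arr.length := by omega
    subst hi'
    have : PySem.List.pyRange (arr.length : Int) (arr.length : Int) = [] := by
      simp [PySem.List.pyRange]
    simp [this, phaseSum]
termination_by arr.length - i

theorem altLoop_eq (arr : List Int) (m : Nat) (total : Int)
    (hm : 4 * m ≤ arr.length) :
    altLoop arr (arr.length : Int) ((4 * m : Nat) : Int) total =
      total + phaseSum (4 * m) (arr.drop (4 * m)) := by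
  rw [altLoop]
  by_cases h : ((4 * m : Nat) : Int) + 4 ≤ (arr.length : Int)
  · rw [dif_pos h]
    have hlen : 4 * m + 4 ≤ arr.length := by omega
    have e1 : ((4 * m : Nat) : Int) + 4 = ((4 * (m + 1) : Nat) : Int) := by push_cast; ring
    rw [e1, altLoop_eq arr (m + 1) _ (by omega)]
    have g : ∀ j : Nat, PySem.List.pyGetD arr (((4 * m : Nat) : Int) + (j : Int)) 0
        = arr.getD (4 * m + j) 0 := by
      intro j
      rw [PySem.List.pyGetD_of_nonneg arr 0 (by positivity)]
      rw [List.getD_eq_getElem?_getD, List.getD_eq_getElem?_getD,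
        show ((4 * m : Nat) : Int) + (j : Int) = ((4 * m + j : Nat) : Int) from by push_cast; ring,
        Int.toNat_natCast]
    have hd : arr.drop (4 * m) = arr.getD (4 * m) 0 :: arr.getD (4 * m + 1) 0
        :: arr.getD (4 * m + 2) 0 :: arr.getD (4 * m + 3) 0 :: arr.drop (4 * m + 4) := by
      rw [List.drop_eq_getElem_cons (by omega), List.drop_eq_getElem_cons (by omega),
        List.drop_eq_getElem_cons (by omega), List.drop_eq_getElem_cons (by omega)]
      simp only [List.getD_eq_getElem _ _ (by omega : 4 * m < arr.length),
        List.getD_eq_getElem _ _ (by omega : 4 * m + 1 < arr.length),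
        List.getD_eq_getElem _ _ (by omega : 4 * m + 2 < arr.length),
        List.getD_eq_getElem _ _ (by omega : 4 * m + 3 < arr.length)]
    rw [hd, phaseSum_chunk _ _ _ _ _ _ (by omega)]
    have g0 := g 0; rw [Nat.cast_zero, add_zero] at g0
    have g1 := g 1; rw [Nat.cast_one] at g1
    have g2 := g 2; rw [show ((2 : Nat) : Int) = 2 from by norm_num] at g2
    have g3 := g 3; rw [show ((3 : Nat) : Int) = 3 from by norm_num] at g3
    rw [g0, g1, g2, g3, show 4 * m + 4 = 4 * (m + 1) from by ring]
    ring_nf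
  · rw [dif_neg h]
    have hlt : arr.length < 4 * m + 4 := by omega
    rw [PySem.List.slice_from arr (by positivity)]
    have ht : ((4 * m : Nat) : Int).toNat = 4 * m := by omega
    rw [ht, phaseSum_small (4 * m) _ (by omega) (by simp; omega)]
termination_by arr.length - 4 * m
decreasing_by omega

-- ===== VERDICT (by name: the statement is the Claim_ definition above) =====
theorem solution_spec : Claim_equal_solution := by
  intro arr _
  show solution arr = solution_alt arr
  unfold solution solution_alt
  have h0 := foldA_eq arr 0 0 (by omega)
  have h1 := altLoop_eq arr 0 0 (by omega)
  simp only [Nat.cast_zero, Nat.mul_zero, List.drop_zero, zero_add] at h0 h1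
  exact h0.trans h1.symm
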